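-- pv_equiv track=rewrite | github.com/hydromatic/morel-rust | etc/enable_queries.py | extract_output_blocks
-- ===== SOURCE A (Python) =====
-- from typing import List, Optional, Tuple
--
-- def extract_output_blocks(raw_output: str) -> List[List[str]]:
--     """
--     Split binary output into blocks of output lines.
--     Each block corresponds to one statement's '> ...' output.
--     Input echo lines (no '>' prefix) separate blocks.
--     """
--     blocks: List[List[str]] = []
--     current_output: List[str] = []
--     in_output = False
--
--     for line in raw_output.split('\n'):
--         if line.startswith('> '):
--             in_output = True
--             current_output.append(line[2:])
--         elif line == '>':
--             in_output = True
--             current_output.append('')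
--         else:
--             if in_output and current_output:
--                 blocks.append(current_output[:])
--                 current_output = []
--                 in_output = False
--             # non-'>' line: input echo or blank — don't append to output
--
--     if current_output:
--         blocks.append(current_output[:])
--
--     return blocks
-- ===== SOURCE B (Python) =====
-- from itertools import groupby
-- from typing import List
--
--
-- def extract_output_blocks(raw_output: str) -> List[List[str]]:
--     """
--     Split binary output into blocks of output lines.
--     Each maximal run of consecutive '> ...' lines is one block;
--     all other lines merely separate blocks.
--     """
--     def is_out(line: str) -> bool:
--         return line.startswith('> ') or line == '>'
--
--     # '>'[2:] == '' and '> x'[2:] == 'x', so one transform covers both cases.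
--     return [[line[2:] for line in group]
--             for key, group in groupby(raw_output.split('\n'), key=is_out)
--             if key]
-- ===== Notes on version B (the rewrite author's own statement) =====
-- stated objective: idiomatic
-- what changed: Replaces A's in_output/current_output flush state machine with a declarative itertools.groupby partition of the lines into maximal runs keyed by is_out, mapping line[2:] over the kept runs.
import Mathlib
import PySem

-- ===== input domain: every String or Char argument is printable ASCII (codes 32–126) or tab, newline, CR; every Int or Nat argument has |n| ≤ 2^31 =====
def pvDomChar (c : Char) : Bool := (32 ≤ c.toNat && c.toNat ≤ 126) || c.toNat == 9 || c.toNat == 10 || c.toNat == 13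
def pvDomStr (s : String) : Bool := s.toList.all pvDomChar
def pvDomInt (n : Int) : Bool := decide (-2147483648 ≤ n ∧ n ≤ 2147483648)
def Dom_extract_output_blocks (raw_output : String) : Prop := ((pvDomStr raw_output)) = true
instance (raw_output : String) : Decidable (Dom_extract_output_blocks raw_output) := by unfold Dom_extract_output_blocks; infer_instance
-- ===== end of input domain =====

-- B replaces A's in_output/current_output flush state machine by grouping the lines
-- into maximal runs of '>'-output lines and mapping line[2:] over each run (idiomatic).

-- ===== PORT A =====
-- one step of A's for-loop; state = (blocks, current_output, in_output)
def pvStepA (st : List (List String) × List String × Bool) (line : String) :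
    List (List String) × List String × Bool :=
  if PySem.Str.startswith line "> " then
    (st.1, st.2.1 ++ [PySem.Str.slice line (some 2) none], true)
  else if line == ">" then
    (st.1, st.2.1 ++ [""], true)
  else if st.2.2 && !st.2.1.isEmpty then
    (st.1 ++ [st.2.1], [], false)
  else
    st

def extract_output_blocks (raw_output : String) : List (List String) :=
  -- sep "\n" is a nonempty literal, so split? is always `some`; getD never takes its default
  let lines := (PySem.Str.split? raw_output "\n").getD []
  let st := List.foldl pvStepA ([], [], false) lines
  if st.2.1.isEmpty then st.1 else st.1 ++ [st.2.1]

-- ===== PORT B =====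
def pvIsOut (line : String) : Bool := PySem.Str.startswith line "> " || line == ">"

def pvDrop2 (line : String) : String := PySem.Str.slice line (some 2) none

-- itertools.groupby(lines, key=is_out), keeping only the key=True runs, ported as
-- maximal-run recursion (takeWhile/dropWhile): exact, since groupby yields maximal runs.
def pvGroups : List String → List (List String)
  | [] => []
  | l :: ls =>
    if pvIsOut l then
      (pvDrop2 l :: (ls.takeWhile pvIsOut).map pvDrop2) :: pvGroups (ls.dropWhile pvIsOut)
    else
      pvGroups ls
termination_by ls => ls.length
decreasing_by
  · have := List.length_dropWhile_le pvIsOut ls; simp; omega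
  · simp

def extract_output_blocks_alt (raw_output : String) : List (List String) :=
  pvGroups ((PySem.Str.split? raw_output "\n").getD [])

-- ===== PRECONDITION & SPEC =====
def Spec_extract_output_blocks (raw_output : String) (out : List (List String)) : Prop := out = extract_output_blocks_alt raw_output
instance (raw_output : String) (out : List (List String)) : Decidable (Spec_extract_output_blocks raw_output out) := by unfold Spec_extract_output_blocks; infer_instance

-- ===== CLAIM (what is proved, stated in full; the proofs are below) =====
def Claim_equal_extract_output_blocks : Prop := ∀ (raw_output : String), Dom_extract_output_blocks raw_output → Spec_extract_output_blocks raw_output (extract_output_blocks raw_output)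

-- ===== LEMMAS AND PROOFS =====

def pvFinish (st : List (List String) × List String × Bool) : List (List String) :=
  if st.2.1.isEmpty then st.1 else st.1 ++ [st.2.1]

lemma pvStepA_sw {l : String} (h : PySem.Str.startswith l "> " = true)
    (blocks : List (List String)) (cur : List String) (b : Bool) :
    pvStepA (blocks, cur, b) l = (blocks, cur ++ [pvDrop2 l], true) := by
  simp only [pvStepA, h, if_true, pvDrop2]

lemma pvStepA_gt (blocks : List (List String)) (cur : List String) (b : Bool) :
    pvStepA (blocks, cur, b) ">" = (blocks, cur ++ [""], true) := by
  have h : PySem.Chars.startswith ['>'] ['>', ' '] = false := by decide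
  simp [pvStepA, h]

lemma pvStepA_other {l : String} (h1 : PySem.Str.startswith l "> " = false) (h2 : l ≠ ">")
    (blocks : List (List String)) (cur : List String) :
    pvStepA (blocks, cur, !cur.isEmpty) l =
      if cur.isEmpty then (blocks, cur, !cur.isEmpty) else (blocks ++ [cur], [], false) := by
  simp only [pvStepA, h1, Bool.false_eq_true, if_false, beq_iff_eq, h2]
  cases cur <;> simp

lemma pvIsOut_sw {l : String} (h : PySem.Str.startswith l "> " = true) : pvIsOut l = true := by
  simp only [pvIsOut, h, Bool.true_or]

lemma pvIsOut_gt : pvIsOut ">" = true := by decide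

lemma pvIsOut_other {l : String} (h1 : PySem.Str.startswith l "> " = false) (h2 : l ≠ ">") :
    pvIsOut l = false := by
  simp only [pvIsOut, h1, Bool.false_or]
  exact decide_eq_false h2

lemma pvDrop2_gt : pvDrop2 ">" = "" := by decide

-- loop invariant: folding A's step from state (blocks, cur, cur ≠ []) and then flushing
-- equals blocks ++ (cur merged with the leading output run) :: the remaining groups
lemma pvFold_eq_groups (lines : List String) :
    ∀ (blocks : List (List String)) (cur : List String) (b : Bool), b = !cur.isEmpty →
    pvFinish (List.foldl pvStepA (blocks, cur, b) lines)
    = blocks ++ (if cur.isEmpty then pvGroups lines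
        else (cur ++ (lines.takeWhile pvIsOut).map pvDrop2) :: pvGroups (lines.dropWhile pvIsOut)) := by
  induction lines with
  | nil =>
    intro blocks cur b hb
    cases cur <;> simp [pvFinish, pvGroups]
  | cons l ls ih =>
    intro blocks cur b hb; subst hb
    rw [List.foldl_cons]
    by_cases h1 : PySem.Str.startswith l "> " = true
    · rw [pvStepA_sw h1, ih blocks (cur ++ [pvDrop2 l]) true (by simp)]
      have hout := pvIsOut_sw h1
      cases cur <;>
        simp [pvGroups, hout]
    · by_cases h2 : l = ">"
      · subst h2
        rw [pvStepA_gt, ih blocks (cur ++ [""]) true (by simp)]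
        cases cur <;>
          simp [pvGroups, pvIsOut_gt, pvDrop2_gt]
      · have h1' : PySem.Str.startswith l "> " = false := by
          simpa using h1
        have hout := pvIsOut_other h1' h2
        rw [pvStepA_other h1' h2]
        rcases cur with _ | ⟨c, cs⟩
        · simp only [List.isEmpty_nil, if_true]
          rw [ih blocks [] (!true) (by simp)]
          simp [pvGroups, hout]
        · simp only [List.isEmpty_cons, Bool.false_eq_true, if_false]
          rw [show (false : Bool) = !(List.isEmpty ([] : List String)) by simp]
          rw [ih (blocks ++ [c :: cs]) [] _ rfl]
          simp [pvGroups, hout]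

-- ===== VERDICT (by name: the statement is the Claim_ definition above) =====
theorem extract_output_blocks_spec : Claim_equal_extract_output_blocks := by
  intro raw _
  unfold Spec_extract_output_blocks extract_output_blocks extract_output_blocks_alt
  have := pvFold_eq_groups ((PySem.Str.split? raw "\n").getD []) [] [] false (by simp)
  simpa [pvFinish] using this
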